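-- pv_equiv track=rewrite | github.com/posl/comment_recommendation | script/split_gen/3_time/ja/216_C/4.py | solve
-- ===== SOURCE A (Python) =====
-- def solve(n):
--     ans = []
--     while n > 0:
--         if n % 2 == 0:
--             ans.append('B')
--             n = n // 2
--         else:
--             ans.append('A')
--             n -= 1
--     return ''.join(ans[::-1])
-- ===== SOURCE B (Python) =====
-- def solve(n):
--     if n <= 0:
--         return ''
--     bits = bin(n)[2:]
--     out = ['A']
--     for b in bits[1:]:
--         out.append('B')
--         if b == '1':
--             out.append('A')
--     return ''.join(out)
-- ===== Notes on version B (the rewrite author's own statement) =====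
-- stated objective: simpler
-- what changed: Instead of simulating the halve/decrement loop and reversing the accumulator, B reads n's binary digits MSB-first and emits 'A' for the leading bit and 'B' (+'A' for a 1-bit) per remaining bit, with no reversal.
import Mathlib
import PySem

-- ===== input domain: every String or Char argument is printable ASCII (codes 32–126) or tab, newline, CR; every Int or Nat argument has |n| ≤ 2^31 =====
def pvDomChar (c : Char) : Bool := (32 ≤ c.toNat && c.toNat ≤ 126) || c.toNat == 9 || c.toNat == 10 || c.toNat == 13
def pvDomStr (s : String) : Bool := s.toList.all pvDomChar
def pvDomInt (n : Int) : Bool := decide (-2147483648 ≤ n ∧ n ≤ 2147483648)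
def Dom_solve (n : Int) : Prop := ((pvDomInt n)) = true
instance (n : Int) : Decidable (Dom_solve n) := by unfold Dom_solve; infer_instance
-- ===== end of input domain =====

-- B reads n's binary digits MSB-first (A for the leading bit, B plus A-for-1 per later bit),
-- replacing A's halve/decrement simulation with reversed accumulator; objective: simpler.

-- ===== PORT A =====
-- while n > 0: append 'B' and halve when even, append 'A' and decrement when odd
def solveLoop (n : Int) (ans : List Char) : List Char :=
  if n > 0 then
    if PySem.Int.mod n 2 = 0 then
      solveLoop (PySem.Int.floordiv n 2) (ans ++ ['B'])
    else
      solveLoop (n - 1) (ans ++ ['A'])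
  else ans
termination_by n.toNat
decreasing_by
  · rw [PySem.Int.floordiv_eq_ediv_of_pos (by omega)]; omega
  · omega

def solve (n : Int) : String := String.mk ((solveLoop n []).reverse)

-- ===== PORT B =====
-- bin(m)[2:] for m > 0 : binary digits, most significant first (bitsOf 0 = [])
def bitsOf (m : Nat) : List Char :=
  if m = 0 then [] else bitsOf (m / 2) ++ [if m % 2 = 1 then '1' else '0']
termination_by m
decreasing_by omega

def solve_alt (n : Int) : String :=
  if n ≤ 0 then "" else
    String.mk ((bitsOf n.toNat).tail.foldl
      (fun out b => (out ++ ['B']) ++ (if b = '1' then ['A'] else [])) ['A'])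

-- ===== PRECONDITION & SPEC =====
def Spec_solve (n : Int) (out : String) : Prop := out = solve_alt n
instance (n : Int) (out : String) : Decidable (Spec_solve n out) := by unfold Spec_solve; infer_instance

-- ===== CLAIM (what is proved, stated in full; the proofs are below) =====
def Claim_equal_solve : Prop := ∀ (n : Int), Dom_solve n → Spec_solve n (solve n)

-- ===== LEMMAS AND PROOFS =====

-- the character sequence A's loop appends, as a function of n.toNat
def seqN (m : Nat) : List Char :=
  if m = 0 then [] else if m % 2 = 0 then 'B' :: seqN (m / 2) else 'A' :: seqN (m - 1)
termination_by m
decreasing_by all_goals omega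

-- B's fold over the low bits
def gB (m : Nat) : List Char :=
  (bitsOf m).tail.foldl (fun out b => (out ++ ['B']) ++ (if b = '1' then ['A'] else [])) ['A']

theorem solveLoop_eq (m : Nat) : ∀ (n : Int), n.toNat = m → ∀ ans, solveLoop n ans = ans ++ seqN m := by
  induction m using Nat.strong_induction_on with
  | _ m ih =>
    intro n hm ans
    rw [solveLoop]
    by_cases hn : n > 0
    · simp only [hn, if_true]
      rw [PySem.Int.mod_eq_emod_of_pos (by omega)]
      by_cases he : n % 2 = 0
      · simp only [he, if_true]
        rw [PySem.Int.floordiv_eq_ediv_of_pos (by omega)]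
        rw [ih (m / 2) (by omega) (n / 2) (by omega)]
        have hs : seqN m = 'B' :: seqN (m / 2) := by
          rw [seqN]; simp [show ¬ m = 0 by omega, show m % 2 = 0 by omega]
        rw [hs]; simp
      · simp only [he, if_false]
        rw [ih (m - 1) (by omega) (n - 1) (by omega)]
        have hs : seqN m = 'A' :: seqN (m - 1) := by
          rw [seqN]; simp [show ¬ m = 0 by omega, show ¬ m % 2 = 0 by omega]
        rw [hs]; simp
    · have hm0 : m = 0 := by omega
      simp [hn, hm0, seqN]

theorem bitsOf_ne_nil (m : Nat) (h : m ≠ 0) : bitsOf m ≠ [] := by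
  rw [bitsOf]; simp [h]

theorem tail_append_ne {α : Type} (xs ys : List α) (h : xs ≠ []) :
    (xs ++ ys).tail = xs.tail ++ ys := by
  cases xs with
  | nil => exact absurd rfl h
  | cons a l => simp

theorem seqN_rev (m : Nat) (h : m ≠ 0) : (seqN m).reverse = gB m := by
  induction m using Nat.strong_induction_on with
  | _ m ih =>
    by_cases h1 : m = 1
    · subst h1
      have h1s : seqN 1 = ['A'] := by rw [seqN, seqN]; simp
      have h1b : bitsOf 1 = ['1'] := by rw [bitsOf, bitsOf]; simp
      rw [h1s]; unfold gB; rw [h1b]; simp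
    by_cases he : m % 2 = 0
    · -- even, m ≥ 2
      have hh : m / 2 ≠ 0 := by omega
      have hs : seqN m = 'B' :: seqN (m / 2) := by
        rw [seqN]; simp [show ¬ m = 0 from h, he]
      rw [hs, List.reverse_cons, ih (m / 2) (by omega) hh]
      unfold gB
      conv_rhs => rw [bitsOf]
      rw [if_neg h]
      have hb : (m % 2 = 1) = False := by simp; omega
      rw [tail_append_ne _ _ (bitsOf_ne_nil _ hh), List.foldl_append]
      simp [hb]
    · -- odd, m ≥ 3
      have hm3 : 3 ≤ m := by omega
      have hh : m / 2 ≠ 0 := by omega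
      have hs : seqN m = 'A' :: 'B' :: seqN (m / 2) := by
        rw [seqN]; simp only [h, if_false, he, if_false]
        rw [seqN]
        simp [show ¬ m - 1 = 0 by omega, show (m - 1) % 2 = 0 by omega,
          show (m - 1) / 2 = m / 2 by omega]
      rw [hs, List.reverse_cons, List.reverse_cons, ih (m / 2) (by omega) hh]
      unfold gB
      conv_rhs => rw [bitsOf]
      rw [if_neg h]
      have hb : m % 2 = 1 := by omega
      rw [tail_append_ne _ _ (bitsOf_ne_nil _ hh), List.foldl_append]
      simp [hb]

-- ===== VERDICT (by name: the statement is the Claim_ definition above) =====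
theorem solve_spec : Claim_equal_solve := by
  intro n _
  unfold Spec_solve solve solve_alt
  rw [solveLoop_eq n.toNat n rfl []]
  by_cases hn : n ≤ 0
  · have : n.toNat = 0 := by omega
    rw [this]
    have h0 : seqN 0 = [] := by rw [seqN]; simp
    simp [hn, h0]
    rfl
  · simp only [hn, if_false]
    rw [List.nil_append, seqN_rev n.toNat (by omega)]
    rfl
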